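-- pv_equiv track=rewrite | github.com/eduardosantosbr/algorithms | greedy_algorithm_1.py | maximumAllocation
-- ===== SOURCE A (Python) =====
-- def maximumAllocation(programs, space, maxStorage):
--     programs = sorted(programs, key=lambda x: space[x])
--
--     programsAllocated = []
--     i = 0
--     while i < len(programs):
--         if (maxStorage >= space[programs[i]]):
--             programsAllocated.append(programs[i])
--             maxStorage -= space[programs[i]]
--         i += 1
--     return programsAllocated
-- ===== SOURCE B (Python) =====
-- def maximumAllocation(programs, space, maxStorage):
--     ordered = sorted(programs, key=lambda p: space[p])
--     totals = [0]
--     for p in ordered: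
--         totals.append(totals[-1] + space[p])
--     k = next((i for i, t in enumerate(totals[1:]) if t > maxStorage), len(ordered))
--     return ordered[:k]
-- ===== Notes on version B (the rewrite author's own statement) =====
-- stated objective: alternative
-- what changed: B replaces A's budget-mutating skip-scan with a prefix-sum table over the sorted programs, a first-overflow cutoff index, and a slice (valid because on a key-sorted list the first item that does not fit ends all allocation).
-- outside the precondition, e.g. on maximumAllocation(['a'], {}, 5): A raises KeyError, B raises KeyError
import Mathlib
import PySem

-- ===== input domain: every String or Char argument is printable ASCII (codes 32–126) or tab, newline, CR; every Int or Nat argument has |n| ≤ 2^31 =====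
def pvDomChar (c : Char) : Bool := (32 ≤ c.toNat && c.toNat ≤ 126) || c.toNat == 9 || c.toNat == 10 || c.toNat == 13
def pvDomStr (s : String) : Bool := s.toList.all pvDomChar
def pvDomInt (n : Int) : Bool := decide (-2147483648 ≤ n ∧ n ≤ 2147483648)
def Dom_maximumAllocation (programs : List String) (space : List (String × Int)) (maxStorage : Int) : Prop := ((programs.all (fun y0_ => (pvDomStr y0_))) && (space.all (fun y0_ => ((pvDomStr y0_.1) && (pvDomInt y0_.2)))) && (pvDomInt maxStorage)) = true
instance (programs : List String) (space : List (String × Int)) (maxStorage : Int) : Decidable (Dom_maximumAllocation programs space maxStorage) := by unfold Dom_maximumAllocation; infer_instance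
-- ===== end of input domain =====

-- B replaces A's budget-mutating scan by a prefix-sum table with a first-overflow cutoff and a slice (objective: alternative decomposition, same cost).


-- ===== PORT A =====
-- dict lookup space[p]; Python raises KeyError when p is missing — Pre_ excludes that,
-- so the .getD 0 default is never reached on admitted inputs.
def pvKey (space : List (String × Int)) (p : String) : Int := (space.lookup p).getD 0

-- the while-loop of A: mutable budget, append when it fits
def pvAllocLoop (space : List (String × Int)) : List String → Int → List String
  | [], _ => []
  | p :: rest, budget =>
      if pvKey space p ≤ budget then p :: pvAllocLoop space rest (budget - pvKey space p)
      else pvAllocLoop space rest budget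

def maximumAllocation (programs : List String) (space : List (String × Int)) (maxStorage : Int) : List String :=
  pvAllocLoop space (PySem.List.sorted programs (fun x => pvKey space x)) maxStorage

-- ===== PORT B =====
-- totals[1:]: running cumulative sums of the spaces of the sorted programs
def pvPrefixSums (space : List (String × Int)) : List String → Int → List Int
  | [], _ => []
  | p :: rest, t => (t + pvKey space p) :: pvPrefixSums space rest (t + pvKey space p)

-- next((i for i, t in ... if t > maxStorage), len): index of the first overflowing total
def pvCutoff (m : Int) : List Int → Nat
  | [] => 0
  | t :: rest => if m < t then 0 else 1 + pvCutoff m rest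

def maximumAllocation_alt (programs : List String) (space : List (String × Int)) (maxStorage : Int) : List String :=
  let ordered := PySem.List.sorted programs (fun x => pvKey space x)
  ordered.take (pvCutoff maxStorage (pvPrefixSums space ordered 0))

-- ===== PRECONDITION & SPEC =====
-- Pre_ excludes exactly the inputs where Python A raises KeyError: some program name missing from the dict.
def Pre_maximumAllocation (programs : List String) (space : List (String × Int)) (maxStorage : Int) : Prop :=
  ∀ p ∈ programs, (space.lookup p).isSome
instance (programs : List String) (space : List (String × Int)) (maxStorage : Int) : Decidable (Pre_maximumAllocation programs space maxStorage) := by unfold Pre_maximumAllocation; infer_instance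

def pvWitness_maximumAllocation : List String × (List (String × Int)) × Int :=
  (["a", "b"], [("a", 3), ("b", 1)], 4)

def Spec_maximumAllocation (programs : List String) (space : List (String × Int)) (maxStorage : Int) (out : List String) : Prop := out = maximumAllocation_alt programs space maxStorage
instance (programs : List String) (space : List (String × Int)) (maxStorage : Int) (out : List String) : Decidable (Spec_maximumAllocation programs space maxStorage out) := by unfold Spec_maximumAllocation; infer_instance

-- ===== CLAIM (what is proved, stated in full; the proofs are below) =====
def Claim_equal_maximumAllocation : Prop := ∀ (programs : List String) (space : List (String × Int)) (maxStorage : Int), Dom_maximumAllocation programs space maxStorage → Pre_maximumAllocation programs space maxStorage → Spec_maximumAllocation programs space maxStorage (maximumAllocation programs space maxStorage)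

-- ===== LEMMAS AND PROOFS =====

-- once the budget is below every remaining space, A's loop allocates nothing more
lemma pvAllocLoop_nil (space : List (String × Int)) (l : List String) (b : Int)
    (h : ∀ q ∈ l, b < pvKey space q) : pvAllocLoop space l b = [] := by
  induction l with
  | nil => rfl
  | cons p rest ih =>
      simp only [pvAllocLoop]
      rw [if_neg (by exact not_le.mpr (h p (by simp)))]
      exact ih (fun q hq => h q (by simp [hq]))

-- on a key-sorted list, A's scan equals the cumulative-sum cutoff prefix
lemma pvMain (space : List (String × Int)) : ∀ (l : List String) (t m : Int),
    l.Pairwise (fun a c => pvKey space a ≤ pvKey space c) →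
    pvAllocLoop space l (m - t) = l.take (pvCutoff m (pvPrefixSums space l t)) := by
  intro l
  induction l with
  | nil => intro t m _; rfl
  | cons p rest ih =>
      intro t m hp
      rcases List.pairwise_cons.mp hp with ⟨hhead, htail⟩
      simp only [pvAllocLoop, pvPrefixSums, pvCutoff]
      by_cases hfit : pvKey space p ≤ m - t
      · rw [if_pos hfit, if_neg (by omega)]
        have := ih (t + pvKey space p) m htail
        rw [show m - t - pvKey space p = m - (t + pvKey space p) by ring, this,
          Nat.add_comm 1, List.take_succ_cons]
      · rw [if_neg hfit, if_pos (by omega)]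
        exact pvAllocLoop_nil space rest (m - t)
          (fun q hq => lt_of_lt_of_le (not_le.mp hfit) (hhead q hq))

-- ===== VERDICT (by name: the statement is the Claim_ definition above) =====
theorem maximumAllocation_spec : Claim_equal_maximumAllocation := by
  intro programs space maxStorage _ _
  unfold Spec_maximumAllocation maximumAllocation maximumAllocation_alt
  have h := pvMain space (PySem.List.sorted programs (fun x => pvKey space x)) 0 maxStorage
    (PySem.List.sorted_pairwise programs (fun x => pvKey space x))
  simpa using h
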